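-- pv_equiv track=rewrite | github.com/hshahrokni2/gracian-pipeline | gracian_pipeline/core/targeted_vision.py | _group_failed_fields
-- ===== SOURCE A (Python) =====
-- from typing import Dict, List, Any, Optional, Tuple
--
-- def _group_failed_fields(failed_fields: List[Dict[str, Any]]) -> Dict[str, List[str]]:
--     """Group failed fields by extraction category."""
--     groups = {}
--
--     for issue in failed_fields:
--         field = issue.get("field", "")
--
--         # Determine group based on field name
--         if "loans" in field:
--             group = "loans"
--         elif "property_designation" in field:
--             group = "property_designation"
--         elif "apartment" in field:
--             group = "apartment_breakdown"
--         elif "fee" in field or "avgift" in field: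
--             group = "fee_structure"
--         elif "building" in field or "byggnader" in field:
--             group = "building_details"
--         else:
--             group = "other"
--
--         if group not in groups:
--             groups[group] = []
--         groups[group].append(field)
--
--     return groups
-- ===== SOURCE B (Python) =====
-- _KEYWORDS = ["loans", "property_designation", "apartment", "fee", "avgift", "building", "byggnader"]
-- _GROUP_OF = {
--     "loans": "loans",
--     "property_designation": "property_designation",
--     "apartment": "apartment_breakdown",
--     "fee": "fee_structure",
--     "avgift": "fee_structure",
--     "building": "building_details",
--     "byggnader": "building_details",
-- }
--
--
-- def _classify(field):
--     for kw in _KEYWORDS: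
--         if kw in field:
--             return _GROUP_OF[kw]
--     return "other"
--
--
-- def _group_failed_fields(failed_fields):
--     """Group failed fields by extraction category (staged: classify all, then group by filtering)."""
--     labeled = [(_classify(issue.get("field", "")), issue.get("field", "")) for issue in failed_fields]
--     return {g: [f for h, f in labeled if h == g] for g in dict.fromkeys(h for h, _ in labeled)}
-- ===== Notes on version B (the rewrite author's own statement) =====
-- stated objective: alternative
-- what changed: Replaces A's single pass that incrementally builds a dict (if/elif classification plus key-existence check and append) with two staged passes: classify every field once via a flat ordered keyword list and a keyword-to-group table, then construct the result non-incrementally by ordered key dedup (dict.fromkeys) with a filtering comprehension per group.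
import Mathlib
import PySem

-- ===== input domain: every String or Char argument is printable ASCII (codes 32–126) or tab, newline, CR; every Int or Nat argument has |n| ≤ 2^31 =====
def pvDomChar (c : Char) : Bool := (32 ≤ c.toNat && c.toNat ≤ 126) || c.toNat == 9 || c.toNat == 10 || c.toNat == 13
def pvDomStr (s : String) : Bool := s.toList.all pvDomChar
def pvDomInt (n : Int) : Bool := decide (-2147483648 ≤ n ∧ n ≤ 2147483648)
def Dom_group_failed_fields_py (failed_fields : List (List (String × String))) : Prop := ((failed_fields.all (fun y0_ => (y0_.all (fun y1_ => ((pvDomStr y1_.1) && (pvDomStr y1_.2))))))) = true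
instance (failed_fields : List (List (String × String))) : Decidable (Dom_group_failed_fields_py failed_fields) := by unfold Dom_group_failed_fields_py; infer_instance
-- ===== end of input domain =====

-- B replaces A's incremental dict-building loop with two staged passes: classify every field
-- once (flat ordered keyword scan + keyword→group table), then build the result by ordered
-- key dedup and per-group filtering (alternative decomposition, same cost).

-- ===== PORT A =====
-- issue.get("field", "") on an association list: first match, default ""
def pvGetField (issue : List (String × String)) : String :=
  ((issue.find? (fun p => p.1 == "field")).map Prod.snd).getD ""

def pvGroupA (field : String) : String :=
  if PySem.Str.isIn "loans" field then "loans"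
  else if PySem.Str.isIn "property_designation" field then "property_designation"
  else if PySem.Str.isIn "apartment" field then "apartment_breakdown"
  else if PySem.Str.isIn "fee" field || PySem.Str.isIn "avgift" field then "fee_structure"
  else if PySem.Str.isIn "building" field || PySem.Str.isIn "byggnader" field then "building_details"
  else "other"

def group_failed_fields_py (failed_fields : List (List (String × String))) : List (String × List String) :=
  (failed_fields.foldl
    (fun (groups : PySem.Dict String (List String)) issue =>
      let field := pvGetField issue
      let group := pvGroupA field
      let groups := if groups.contains group then groups else groups.insert group []
      groups.modify group [] (fun l => l ++ [field]))
    PySem.Dict.empty).items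

-- ===== PORT B =====
def pvKeywords : List String :=
  ["loans", "property_designation", "apartment", "fee", "avgift", "building", "byggnader"]

def pvGroupOf : PySem.Dict String String :=
  PySem.Dict.ofList
    [("loans", "loans"), ("property_designation", "property_designation"),
     ("apartment", "apartment_breakdown"), ("fee", "fee_structure"), ("avgift", "fee_structure"),
     ("building", "building_details"), ("byggnader", "building_details")]

-- _classify: first keyword occurring in field, looked up in the table ("" default is unreachable:
-- every keyword is a key of pvGroupOf)
def pvClassify (field : String) : String :=
  match pvKeywords.find? (fun kw => PySem.Str.isIn kw field) with
  | some kw => pvGroupOf.getD kw ""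
  | none => "other"

def group_failed_fields_py_alt (failed_fields : List (List (String × String))) : List (String × List String) :=
  let labeled := failed_fields.map (fun issue => (pvClassify (pvGetField issue), pvGetField issue))
  (PySem.List.dedup (labeled.map Prod.fst)).map
    (fun g => (g, (labeled.filter (fun p => p.1 == g)).map Prod.snd))

-- ===== PRECONDITION & SPEC =====
def Spec_group_failed_fields_py (failed_fields : List (List (String × String))) (out : List (String × List String)) : Prop := out = group_failed_fields_py_alt failed_fields
instance (failed_fields : List (List (String × String))) (out : List (String × List String)) : Decidable (Spec_group_failed_fields_py failed_fields out) := by unfold Spec_group_failed_fields_py; infer_instance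

-- ===== CLAIM (what is proved, stated in full; the proofs are below) =====
def Claim_equal_group_failed_fields_py : Prop := ∀ (failed_fields : List (List (String × String))), Dom_group_failed_fields_py failed_fields → Spec_group_failed_fields_py failed_fields (group_failed_fields_py failed_fields)

-- ===== LEMMAS AND PROOFS =====
-- the two classifiers agree
theorem pvClassify_eq (field : String) : pvClassify field = pvGroupA field := by
  cases h0 : PySem.Str.isIn "loans" field
  all_goals (try simp_all [pvClassify, pvGroupA, pvKeywords, pvGroupOf, List.find?])
  cases h1 : PySem.Str.isIn "property_designation" field
  all_goals (try simp_all [pvClassify, pvGroupA, pvKeywords, pvGroupOf, List.find?])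
  cases h2 : PySem.Str.isIn "apartment" field
  all_goals (try simp_all [pvClassify, pvGroupA, pvKeywords, pvGroupOf, List.find?])
  cases h3 : PySem.Str.isIn "fee" field
  all_goals (try simp_all [pvClassify, pvGroupA, pvKeywords, pvGroupOf, List.find?])
  cases h4 : PySem.Str.isIn "avgift" field
  all_goals (try simp_all [pvClassify, pvGroupA, pvKeywords, pvGroupOf, List.find?])
  cases h5 : PySem.Str.isIn "building" field
  all_goals (try simp_all [pvClassify, pvGroupA, pvKeywords, pvGroupOf, List.find?])
  cases h6 : PySem.Str.isIn "byggnader" field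
  all_goals (try simp_all [pvClassify, pvGroupA, pvKeywords, pvGroupOf, List.find?])
  all_goals rfl

-- A's "insert-if-absent then write back" step is a single modify
theorem pvStepA_eq (d : PySem.Dict String (List String)) (g f : String) :
    (if d.contains g then d else d.insert g []).modify g [] (fun l => l ++ [f])
      = d.modify g [] (fun l => l ++ [f]) := by
  by_cases h : d.contains g
  · simp [h]
  · simp only [h, Bool.false_eq_true, if_false, PySem.Dict.modify,
      PySem.Dict.getD_insert_self, PySem.Dict.insert_insert_self,
      PySem.Dict.getD_of_not_contains d [] (by simpa using h)]

-- ===== VERDICT (by name: the statement is the Claim_ definition above) =====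
theorem group_failed_fields_py_spec : Claim_equal_group_failed_fields_py := by
  intro ff _
  unfold Spec_group_failed_fields_py group_failed_fields_py group_failed_fields_py_alt
  have hf : (fun (groups : PySem.Dict String (List String)) issue =>
      let field := pvGetField issue
      let group := pvGroupA field
      let groups := if groups.contains group then groups else groups.insert group []
      groups.modify group [] (fun l => l ++ [field]))
    = (fun (d : PySem.Dict String (List String)) issue =>
        d.modify (pvClassify (pvGetField issue)) [] (fun l => l ++ [pvGetField issue])) := by
    funext d issue
    simp only [pvClassify_eq]
    exact pvStepA_eq d _ _
  rw [hf]
  have hmap : ff.foldl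
      (fun (d : PySem.Dict String (List String)) issue =>
        d.modify (pvClassify (pvGetField issue)) [] (fun l => l ++ [pvGetField issue]))
      PySem.Dict.empty
    = (ff.map (fun issue => (pvClassify (pvGetField issue), pvGetField issue))).foldl
        (fun (d : PySem.Dict String (List String)) p => d.modify p.1 [] (fun l => l ++ [p.2]))
        PySem.Dict.empty := by
    rw [List.foldl_map]
  rw [hmap]
  set lab := ff.map (fun issue => (pvClassify (pvGetField issue), pvGetField issue)) with hlab
  have hnd : (lab.foldl
      (fun (d : PySem.Dict String (List String)) p => d.modify p.1 [] (fun l => l ++ [p.2]))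
      PySem.Dict.empty).keys.Nodup :=
    PySem.Dict.nodup_keys_foldl_modify_key lab Prod.fst [] (fun _ p l => l ++ [p.2])
      PySem.Dict.empty (by simp [PySem.Dict.keys_empty])
  rw [PySem.Dict.items_eq_map_keys _ hnd []]
  rw [PySem.Dict.keys_foldl_modify_key lab Prod.fst [] (fun _ p l => l ++ [p.2])]
  simp only [PySem.Dict.getD_foldl_modify_append, PySem.Dict.getD_empty, List.nil_append,
    PySem.List.dedup_eq_ofList, PySem.Dict.keys_empty]
  rfl
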